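-- pv_equiv track=rewrite | github.com/JLSteenwyk/PhyKIT | phykit/services/tree/consensus_network.py | _is_circular_split
-- ===== SOURCE A (Python) =====
-- def _is_circular_split(split, ordering):
--     """Check if a split has exactly 2 boundary gaps in the circular ordering."""
--     n = len(ordering)
--     gaps = 0
--     for i in range(n):
--         curr = ordering[i]
--         nxt = ordering[(i + 1) % n]
--         if (curr in split) != (nxt in split):
--             gaps += 1
--     return gaps == 2
-- ===== SOURCE B (Python) =====
-- def _is_circular_split(split, ordering):
--     """One arc test: the split members must form a single contiguous circular arc."""
--     flags = [name in split for name in ordering]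
--     if True not in flags or False not in flags:
--         return False
--     j = flags.index(False)
--     rotated = flags[j:] + flags[:j]
--     rest = rotated
--     while rest and not rest[0]:   # skip the leading non-split block
--         rest = rest[1:]
--     while rest and rest[0]:       # skip the first split arc
--         rest = rest[1:]
--     return True not in rest       # exactly one arc iff no split member remains
-- ===== Notes on version B (the rewrite author's own statement) =====
-- stated objective: alternative
-- what changed: Instead of counting membership-boundary transitions over all circular adjacent pairs and testing for exactly 2, B builds the membership flag list once, rotates it to start at a non-split element and checks that the split members form a single contiguous arc (skip leading non-members, skip one arc, require no member after).
import Mathlib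
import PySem

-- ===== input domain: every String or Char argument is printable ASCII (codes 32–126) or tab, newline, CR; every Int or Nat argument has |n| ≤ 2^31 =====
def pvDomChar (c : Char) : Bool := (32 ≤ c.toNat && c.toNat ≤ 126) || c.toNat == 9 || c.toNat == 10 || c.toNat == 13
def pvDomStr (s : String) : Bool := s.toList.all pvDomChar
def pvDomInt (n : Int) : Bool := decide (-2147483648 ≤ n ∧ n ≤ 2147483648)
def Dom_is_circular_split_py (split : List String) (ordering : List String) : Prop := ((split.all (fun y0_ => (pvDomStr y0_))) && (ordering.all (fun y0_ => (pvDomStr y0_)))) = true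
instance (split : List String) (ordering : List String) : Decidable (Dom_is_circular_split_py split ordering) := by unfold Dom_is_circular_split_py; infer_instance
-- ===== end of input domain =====

-- B replaces A's circular boundary-gap counting pass by a rotate-to-a-non-split-element
-- plus single-contiguous-arc check (objective: alternative decomposition, similar cost).

-- ===== PORT A =====
-- gaps counter: every index produced by range(n) is in range, so pyGetD with a dummy
-- default is exact for ordering[i] and ordering[(i+1)%n].
def is_circular_split_py (split : List String) (ordering : List String) : Bool :=
  let n : Int := ordering.length
  let gaps : Int :=
    (PySem.List.pyRange 0 n 1).foldl (fun gaps i =>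
      let curr := PySem.List.pyGetD ordering i ""
      let nxt := PySem.List.pyGetD ordering (PySem.Int.mod (i + 1) n) ""
      if (split.contains curr) != (split.contains nxt) then gaps + 1 else gaps) 0
  gaps == 2

-- ===== PORT B =====
-- `flags[j:] + flags[:j]` with 0 ≤ j < len(flags) is exactly drop j ++ take j;
-- the two Python while-loops peel elements off the front of `rest`, i.e. are dropWhile.
def is_circular_split_py_alt (split : List String) (ordering : List String) : Bool :=
  let flags := ordering.map (fun name => split.contains name)
  if !(flags.contains true) || !(flags.contains false) then false
  else
    match PySem.List.index? flags false with
    | none => false   -- unreachable: flags contains false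
    | some j =>
      let rotated := flags.drop j ++ flags.take j
      let rest := rotated.dropWhile (fun b => !b)
      let rest := rest.dropWhile (fun b => b)
      !(rest.contains true)

-- ===== PRECONDITION & SPEC =====
def Spec_is_circular_split_py (split : List String) (ordering : List String) (out : Bool) : Prop := out = is_circular_split_py_alt split ordering
instance (split : List String) (ordering : List String) (out : Bool) : Decidable (Spec_is_circular_split_py split ordering out) := by unfold Spec_is_circular_split_py; infer_instance

-- ===== CLAIM (what is proved, stated in full; the proofs are below) =====
def Claim_equal_is_circular_split_py : Prop := ∀ (split : List String) (ordering : List String), Dom_is_circular_split_py split ordering → Spec_is_circular_split_py split ordering (is_circular_split_py split ordering)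

-- ===== LEMMAS AND PROOFS =====

def linT : List Bool → Nat
  | a :: b :: t => (if a = b then 0 else 1) + linT (b :: t)
  | _ => 0
theorem linT_all_eq (l : List Bool) (c : Bool) (h : ∀ x ∈ l, x = c) : linT l = 0 := by
  induction l with
  | nil => rfl
  | cons a t ih =>
    cases t with
    | nil => rfl
    | cons b t' =>
      have ha := h a (by simp)
      have hb := h b (by simp)
      have h2 : ∀ x ∈ b :: t', x = c := fun x hx => h x (List.mem_cons_of_mem _ hx)
      have h0 := ih h2
      rw [hb] at h0
      simp [linT, ha, hb, h0]
theorem linT_append_singleton (l : List Bool) (h : l ≠ []) (x : Bool) :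
    linT (l ++ [x]) = linT l + (if l.getLast h = x then 0 else 1) := by
  induction l with
  | nil => exact absurd rfl h
  | cons a t ih =>
    cases t with
    | nil => simp [linT]
    | cons b t' =>
      have hih := ih (by simp)
      have e1 : (a::b::t') ++ [x] = a :: (b :: (t' ++ [x])) := rfl
      rw [e1]
      rw [show linT (a :: b :: (t' ++ [x])) = (if a = b then 0 else 1) + linT (b :: (t' ++ [x])) from rfl]
      rw [show (b :: t') ++ [x] = b :: (t' ++ [x]) from rfl] at hih
      rw [hih]
      rw [show linT (a :: b :: t') = (if a = b then 0 else 1) + linT (b :: t') from rfl]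
      rw [show (a :: b :: t').getLast h = (b :: t').getLast (by simp) from rfl]
      omega
theorem linT_count (l : List Bool) :
    (List.range (l.length - 1)).countP
      (fun k => l.getD k false != l.getD (k + 1) false) = linT l := by
  induction l with
  | nil => rfl
  | cons a t ih =>
    cases t with
    | nil => rfl
    | cons b t' =>
      have hlen : (a :: b :: t').length - 1 = t'.length + 1 := by simp
      rw [hlen, List.range_succ_eq_map, List.countP_cons, List.countP_map]
      have hp : ((fun k => (a::b::t').getD k false != (a::b::t').getD (k + 1) false) ∘ Nat.succ)
          = (fun k => (b::t').getD k false != (b::t').getD (k + 1) false) := by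
        funext k; rfl
      rw [hp]
      have hlen2 : (b :: t').length - 1 = t'.length := by simp
      rw [← hlen2, ih]
      simp [linT, List.getD]
      by_cases hab : a = b <;> simp [hab] <;> omega
def circT : List Bool → Nat
  | [] => 0
  | a :: t => linT (a :: t ++ [a])
def circCount (l : List Bool) : Nat :=
  (List.range l.length).countP
    (fun k => l.getD k false != l.getD ((k + 1) % l.length) false)
theorem circCount_eq_circT (l : List Bool) : circCount l = circT l := by
  cases l with
  | nil => rfl
  | cons a t =>
    have hn : (a :: t).length = t.length + 1 := by simp
    unfold circCount circT
    rw [hn, List.range_succ, List.countP_append]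
    have h1 : (List.range t.length).countP (fun k => (a::t).getD k false != (a::t).getD ((k+1) % (t.length+1)) false)
        = (List.range t.length).countP (fun k => (a::t).getD k false != (a::t).getD (k+1) false) := by
      apply List.countP_congr
      intro k hk
      have hk' : k < t.length := List.mem_range.mp hk
      have hm : (k+1) % (t.length+1) = k+1 := Nat.mod_eq_of_lt (by omega)
      simp only [hm]
    rw [h1]
    have h2 := linT_count (a :: t)
    rw [show (a::t).length - 1 = t.length by simp] at h2
    rw [h2]
    have hlast : (a::t).getD t.length false = (a::t).getLast (by simp) := by
      rw [List.getD_eq_getElem _ _ (by simp), List.getLast_eq_getElem]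
      congr 1
    have hwrap : ((t.length+1) % (t.length+1)) = 0 := Nat.mod_self _
    show _ = linT (a :: t ++ [a])
    rw [show (a : Bool) :: t ++ [a] = (a :: t) ++ [a] from rfl,
        linT_append_singleton (a::t) (by simp) a]
    simp only [List.countP_cons, List.countP_nil, hwrap, hlast]
    by_cases hc : (a::t).getLast (by simp) = a <;> simp [hc]
theorem circT_rotate_one (l : List Bool) : circT (l.rotate 1) = circT l := by
  cases l with
  | nil => rfl
  | cons a t =>
    rw [show (a :: t).rotate 1 = t ++ [a] by
      rw [List.rotate_cons_succ, List.rotate_zero]]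
    cases t with
    | nil => rfl
    | cons b t' =>
      show circT (b :: (t' ++ [a])) = circT (a :: b :: t')
      change linT ((b :: (t' ++ [a])) ++ [b]) = linT ((a :: b :: t') ++ [a])
      rw [linT_append_singleton (b :: (t' ++ [a])) (by simp) b]
      have hl : (b :: (t' ++ [a])).getLast (by simp) = a := by
        have h1 := List.getLast?_eq_some_getLast (l := b :: (t' ++ [a])) (by simp)
        have h2 : (b :: (t' ++ [a])).getLast? = some a := by
          rw [show b :: (t' ++ [a]) = (b :: t') ++ [a] from rfl, List.getLast?_concat]
        rw [h2] at h1
        exact (Option.some.inj h1).symm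
      simp only [hl]
      rw [show ((a : Bool) :: b :: t') ++ [a] = a :: (b :: (t' ++ [a])) from rfl]
      rw [show linT (a :: (b :: (t' ++ [a]))) = (if a = b then 0 else 1) + linT (b :: (t' ++ [a])) from rfl]
      by_cases hab : a = b
      · simp [hab, eq_comm]
      · simp [hab]
        omega

theorem T_zero (s : List Bool) : linT (false :: (s ++ [false])) = 0 ↔ ¬ s.contains true := by
  induction s with
  | nil => simp [linT]
  | cons x s' ih =>
    cases x
    · rw [show (false : Bool) :: ((false :: s') ++ [false]) = false :: (false :: (s' ++ [false])) from rfl]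
      rw [show linT (false :: (false :: (s' ++ [false]))) = 0 + linT (false :: (s' ++ [false])) from rfl]
      simpa using ih
    · rw [show (false : Bool) :: ((true :: s') ++ [false]) = false :: (true :: (s' ++ [false])) from rfl]
      rw [show linT (false :: (true :: (s' ++ [false]))) = 1 + linT (true :: (s' ++ [false])) from rfl]
      simp

theorem U_one (s : List Bool) :
    linT (true :: (s ++ [false])) = 1 ↔ ¬ (s.dropWhile (fun b => b)).contains true := by
  induction s with
  | nil => simp [linT]
  | cons x s' ih =>
    cases x
    · rw [show (true : Bool) :: ((false :: s') ++ [false]) = true :: (false :: (s' ++ [false])) from rfl]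
      rw [show linT (true :: (false :: (s' ++ [false]))) = 1 + linT (false :: (s' ++ [false])) from rfl]
      simp only [List.dropWhile_cons]
      simp only [Bool.false_eq_true, if_false, List.contains_cons]
      constructor
      · intro h
        have h0 : linT (false :: (s' ++ [false])) = 0 := by omega
        simpa using (T_zero s').mp h0
      · intro h
        have h1 : ¬ s'.contains true := by simpa using h
        have h0 := (T_zero s').mpr h1
        omega
    · rw [show (true : Bool) :: ((true :: s') ++ [false]) = true :: (true :: (s' ++ [false])) from rfl]
      rw [show linT (true :: (true :: (s' ++ [false]))) = 0 + linT (true :: (s' ++ [false])) from rfl]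
      simpa using ih

theorem T_two (s : List Bool) :
    linT (false :: (s ++ [false])) = 2 ↔
      (s.contains true ∧ ¬ ((s.dropWhile (fun b => !b)).dropWhile (fun b => b)).contains true) := by
  induction s with
  | nil => simp [linT]
  | cons x s' ih =>
    cases x
    · rw [show (false : Bool) :: ((false :: s') ++ [false]) = false :: (false :: (s' ++ [false])) from rfl]
      rw [show linT (false :: (false :: (s' ++ [false]))) = 0 + linT (false :: (s' ++ [false])) from rfl]
      simpa using ih
    · rw [show (false : Bool) :: ((true :: s') ++ [false]) = false :: (true :: (s' ++ [false])) from rfl]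
      rw [show linT (false :: (true :: (s' ++ [false]))) = 1 + linT (true :: (s' ++ [false])) from rfl]
      have hU := U_one s'
      simp only [List.dropWhile_cons, Bool.not_true, Bool.false_eq_true, if_false, if_true,
        List.contains_cons]
      constructor
      · intro h
        refine ⟨by simp, ?_⟩
        have h1 := hU.mp (by omega)
        simpa using h1
      · rintro ⟨-, h⟩
        have h1 := hU.mpr (by simpa using h)
        omega

theorem foldl_count_int {α : Type} (l : List α) (p : α → Bool) (c : Int) :
    l.foldl (fun acc x => if p x then acc + 1 else acc) c = c + l.countP p := by
  induction l generalizing c with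
  | nil => simp
  | cons x t ih =>
    simp only [List.foldl_cons, List.countP_cons, ih]
    by_cases hp : p x <;> simp [hp] <;> omega

theorem contains_getD (split ordering : List String) (k : Nat) (hk : k < ordering.length) :
    split.contains (ordering.getD k "") = (ordering.map (fun name => split.contains name)).getD k false := by
  rw [List.getD_eq_getElem _ _ hk, List.getD_eq_getElem _ _ (by simpa using hk)]
  simp

theorem A_eq_circCount (split ordering : List String) :
    is_circular_split_py split ordering
      = (circCount (ordering.map (fun name => split.contains name)) == 2) := by
  change ((PySem.List.pyRange 0 (ordering.length : Int) 1).foldl (fun (gaps i : Int) =>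
      if (split.contains (PySem.List.pyGetD ordering i "")
          != split.contains (PySem.List.pyGetD ordering (PySem.Int.mod (i + 1) (ordering.length : Int)) ""))
      then gaps + 1 else gaps) 0 == 2) = _
  rw [foldl_count_int]
  have hcnt : (PySem.List.pyRange 0 (ordering.length : Int) 1).countP
      (fun i => split.contains (PySem.List.pyGetD ordering i "")
          != split.contains (PySem.List.pyGetD ordering (PySem.Int.mod (i + 1) (ordering.length : Int)) ""))
      = circCount (ordering.map (fun name => split.contains name)) := by
    rw [PySem.List.pyRange_one, List.countP_map]
    unfold circCount
    rw [show ((ordering.length : Int) - 0).toNat = ordering.length by simp]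
    rw [show (ordering.map (fun name => split.contains name)).length = ordering.length by simp]
    apply List.countP_congr
    intro k hk
    have hk' : k < ordering.length := List.mem_range.mp hk
    have e1 : (0 : Int) + (k : Int) = ((k : Nat) : Int) := by omega
    have e2 : (k : Int) + 1 = (((k + 1 : Nat)) : Int) := by omega
    simp only [Function.comp, e1, e2, PySem.Int.mod_natCast, PySem.List.pyGetD_natCast]
    rw [contains_getD split ordering k hk', contains_getD split ordering ((k+1) % ordering.length) (Nat.mod_lt _ (by omega))]
  rw [hcnt]
  have key : ∀ (c : Nat), (((0:Int) + (c:Int)) == 2) = (c == 2) := by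
    intro c
    by_cases h : c = 2
    · subst h; rfl
    · have h1 : ((0:Int) + (c:Int) == 2) = false := by
        simp only [beq_eq_false_iff_ne, ne_eq]
        omega
      have h2 : (c == 2) = false := by
        simp only [beq_eq_false_iff_ne, ne_eq]
        omega
      rw [h1, h2]
  exact key _


theorem circT_rotate (l : List Bool) (j : Nat) : circT (l.rotate j) = circT l := by
  induction j with
  | zero => simp
  | succ j ih =>
    have h : l.rotate (j + 1) = (l.rotate j).rotate 1 := by rw [List.rotate_rotate]
    rw [h, circT_rotate_one, ih]

theorem circT_all_false (l : List Bool) (h : ¬ l.contains true = true) : circT l = 0 := by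
  cases l with
  | nil => rfl
  | cons a t =>
    have hall : ∀ x ∈ a :: t, x = false := by
      intro x hx
      cases x
      · rfl
      · exact absurd (by simpa using hx) h
    show linT ((a :: t) ++ [a]) = 0
    apply linT_all_eq _ false
    intro x hx
    rcases List.mem_append.mp hx with hx | hx
    · exact hall x hx
    · simp only [List.mem_singleton] at hx
      rw [hx]
      exact hall a (by simp)

theorem circT_all_true (l : List Bool) (h : ¬ l.contains false = true) : circT l = 0 := by
  cases l with
  | nil => rfl
  | cons a t =>
    have hall : ∀ x ∈ a :: t, x = true := by
      intro x hx
      cases x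
      · exact absurd (by simpa using hx) h
      · rfl
    show linT ((a :: t) ++ [a]) = 0
    apply linT_all_eq _ true
    intro x hx
    rcases List.mem_append.mp hx with hx | hx
    · exact hall x hx
    · simp only [List.mem_singleton] at hx
      rw [hx]
      exact hall a (by simp)

theorem main_equiv (split ordering : List String) :
    is_circular_split_py split ordering = is_circular_split_py_alt split ordering := by
  rw [A_eq_circCount, circCount_eq_circT]
  unfold is_circular_split_py_alt
  set flags := ordering.map (fun name => split.contains name) with hflags
  show (circT flags == 2)
      = (if (!(flags.contains true) || !(flags.contains false)) = true then false
         else match PySem.List.index? flags false with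
           | none => false
           | some j =>
             !(((flags.drop j ++ flags.take j).dropWhile (fun b => !b)).dropWhile
                 (fun b => b)).contains true)
  by_cases h1 : flags.contains true = true
  · by_cases h2 : flags.contains false = true
    · -- main case: both a split member and a non-member occur
      have hcond : (!(flags.contains true) || !(flags.contains false)) = false := by
        rw [h1, h2]
        rfl
      rw [hcond, if_neg (by simp)]
      have hmem : false ∈ flags := by simpa using h2
      obtain ⟨j, hj⟩ : ∃ j, PySem.List.index? flags false = some j := by
        cases hidx : PySem.List.index? flags false with
        | none => exact absurd ((PySem.List.index?_eq_none_iff _ _).mp hidx) (by simpa using hmem)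
        | some j => exact ⟨j, rfl⟩
      rw [hj]
      obtain ⟨hk, hjval, -⟩ := PySem.List.getElem_of_index?_eq_some hj
      have hrot : flags.drop j ++ flags.take j = flags.rotate j :=
        (List.rotate_eq_drop_append_take (by omega)).symm
      have hdrop : flags.drop j = flags[j] :: flags.drop (j + 1) :=
        List.drop_eq_getElem_cons hk
      set s : List Bool := flags.drop (j + 1) ++ flags.take j with hs
      have hsplit : flags.drop j ++ flags.take j = false :: s := by
        rw [hdrop, hjval]
        simp [hs]
      have hrot2 : flags.rotate j = false :: s := by rw [← hrot]; exact hsplit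
      show (circT flags == 2)
          = !(((flags.drop j ++ flags.take j).dropWhile (fun b => !b)).dropWhile (fun b => b)).contains true
      rw [hsplit]
      have hLHS : circT flags = linT (false :: (s ++ [false])) := by
        rw [← circT_rotate flags j, hrot2]
        rfl
      rw [hLHS]
      rw [show (false :: s).dropWhile (fun b => !b) = s.dropWhile (fun b => !b) by
        simp [List.dropWhile_cons]]
      have hstrue : s.contains true = true := by
        have hmem2 : true ∈ flags.rotate j := by
          rw [List.mem_rotate]
          simpa using h1
        rw [hrot2] at hmem2
        simp only [List.mem_cons] at hmem2
        rcases hmem2 with h | h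
        · exact absurd h (by simp)
        · simpa using h
      by_cases hrest : ((s.dropWhile (fun b => !b)).dropWhile (fun b => b)).contains true = true
      · rw [hrest]
        have hne : linT (false :: (s ++ [false])) ≠ 2 := fun hc =>
          absurd ((T_two s).mp hc).2 (by simpa using hrest)
        simp only [Bool.not_true]
        exact beq_eq_false_iff_ne.mpr hne
      · have hrf : ((s.dropWhile (fun b => !b)).dropWhile (fun b => b)).contains true = false := by
          cases hc : ((s.dropWhile (fun b => !b)).dropWhile (fun b => b)).contains true
          · rfl
          · exact absurd hc hrest
        rw [hrf]
        have heq : linT (false :: (s ++ [false])) = 2 :=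
          (T_two s).mpr ⟨hstrue, by simpa using hrest⟩
        rw [heq]
        rfl
    · -- no non-member: 0 gaps on the A side, early False on the B side
      have hf : flags.contains false = false := by
        cases hcf : flags.contains false
        · rfl
        · exact absurd hcf h2
      rw [circT_all_true flags h2, hf]
      simp
  · -- no split member: 0 gaps on the A side, early False on the B side
    have hf : flags.contains true = false := by
      cases hcf : flags.contains true
      · rfl
      · exact absurd hcf h1
    rw [circT_all_false flags h1, hf]
    simp

-- ===== VERDICT (by name: the statement is the Claim_ definition above) =====
theorem is_circular_split_py_spec : Claim_equal_is_circular_split_py := by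
  intro split ordering _
  unfold Spec_is_circular_split_py
  exact main_equiv split ordering
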